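-- pv_equiv track=rewrite | github.com/dylanbuchi/advent-of-code | 2022/day1/main.py | get_max_calories
-- ===== SOURCE A (Python) =====
-- def get_max_calories(calories: list[int]) -> list[int]:
--     max_calories = []
--
--     current_max = 0
--
--     for calory in calories:
--         if calory == -1:
--             max_calories.append(current_max)
--             current_max = 0
--         else:
--             current_max += calory
--
--     return max_calories
-- ===== SOURCE B (Python) =====
-- def get_max_calories(calories: list[int]) -> list[int]:
--     groups = []
--     current = []
--     for c in calories:
--         if c == -1:
--             groups.append(current)
--             current = []
--         else:
--             current.append(c)
--     # trailing unterminated group is intentionally not appended, matching the delimiter format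
--     return [sum(g) for g in groups]
-- ===== Notes on version B (the rewrite author's own statement) =====
-- stated objective: alternative
-- what changed: B first partitions the list into the -1-delimited segments and then sums each collected segment in a second pass, instead of threading a single running total through one loop.
import Mathlib
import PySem

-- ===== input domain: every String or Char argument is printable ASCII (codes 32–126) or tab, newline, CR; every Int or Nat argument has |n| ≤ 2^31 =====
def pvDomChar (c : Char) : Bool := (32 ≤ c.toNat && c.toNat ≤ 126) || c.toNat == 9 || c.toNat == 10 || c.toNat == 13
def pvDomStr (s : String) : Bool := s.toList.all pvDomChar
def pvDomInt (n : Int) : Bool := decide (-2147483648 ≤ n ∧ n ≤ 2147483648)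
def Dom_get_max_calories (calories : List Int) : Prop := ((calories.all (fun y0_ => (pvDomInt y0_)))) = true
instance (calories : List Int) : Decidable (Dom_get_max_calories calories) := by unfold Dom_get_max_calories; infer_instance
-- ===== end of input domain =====

-- B partitions the list into -1-delimited segments first, then sums each segment in a second pass (alternative decomposition, same cost).


-- ===== PORT A =====
def get_max_calories (calories : List Int) : List Int :=
  (calories.foldl
    (fun (st : List Int × Int) calory =>
      if calory == -1 then (st.1 ++ [st.2], 0) else (st.1, st.2 + calory))
    ([], 0)).1

-- ===== PORT B =====
-- the loop of Source B: collect the -1-delimited segments, dropping a trailing unterminated one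
def pvSegments : List Int → List Int → List (List Int)
  | [], _ => []
  | c :: rest, current =>
      if c == -1 then current :: pvSegments rest []
      else pvSegments rest (current ++ [c])

def get_max_calories_alt (calories : List Int) : List Int :=
  (pvSegments calories []).map (fun g => g.foldl (· + ·) 0)

-- ===== PRECONDITION & SPEC =====
def Spec_get_max_calories (calories : List Int) (out : List Int) : Prop := out = get_max_calories_alt calories
instance (calories : List Int) (out : List Int) : Decidable (Spec_get_max_calories calories out) := by unfold Spec_get_max_calories; infer_instance

-- ===== CLAIM (what is proved, stated in full; the proofs are below) =====
def Claim_equal_get_max_calories : Prop := ∀ (calories : List Int), Dom_get_max_calories calories → Spec_get_max_calories calories (get_max_calories calories)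

-- ===== LEMMAS AND PROOFS =====
theorem pv_fold_segments (l : List Int) :
    ∀ (acc cur : List Int),
      (l.foldl
        (fun (st : List Int × Int) calory =>
          if calory == -1 then (st.1 ++ [st.2], 0) else (st.1, st.2 + calory))
        (acc, cur.foldl (· + ·) 0)).1
      = acc ++ (pvSegments l cur).map (fun g => g.foldl (· + ·) 0) := by
  induction l with
  | nil => intro acc cur; simp [pvSegments]
  | cons c rest ih =>
      intro acc cur
      by_cases hc : c = -1
      · subst hc
        have h := ih (acc ++ [cur.foldl (· + ·) 0]) []
        simp only [List.foldl_nil] at h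
        simp only [List.foldl_cons, pvSegments, beq_self_eq_true, if_true, h]
        simp
      · have h2 : cur.foldl (· + ·) 0 + c = (cur ++ [c]).foldl (· + ·) 0 := by
          simp [List.foldl_append]
        have hb : (c == (-1 : Int)) = false := by simp [hc]
        simp only [List.foldl_cons, pvSegments, hb]
        rw [h2]
        exact ih acc (cur ++ [c])

-- ===== VERDICT (by name: the statement is the Claim_ definition above) =====
theorem get_max_calories_spec : Claim_equal_get_max_calories := by
  intro calories _
  unfold Spec_get_max_calories get_max_calories get_max_calories_alt
  simpa using pv_fold_segments calories [] []
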